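-- pv_equiv track=rewrite | github.com/nelsonlai/freelance | leetcode/leetcode_problems/codes/1366_rank-teams-by-votes/python3.py | rankTeams
-- ===== SOURCE A (Python) =====
-- from typing import List
--
-- from collections import defaultdict
--
-- def rankTeams(votes: List[str]) -> str:
--     n = len(votes[0])
--     vote_count = defaultdict(lambda: [0] * n)
--
--     for vote in votes:
--         for i, team in enumerate(vote):
--             vote_count[team][i] += 1
--
--     teams = sorted(vote_count.keys())
--     return ''.join(sorted(teams, key=lambda t: (vote_count[t], -ord(t)), reverse=True))
-- ===== SOURCE B (Python) =====
-- def rankTeams(votes):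
--     n = len(votes[0])
--     vote_count = {}
--     for vote in votes:
--         for i, team in enumerate(vote):
--             if team not in vote_count:
--                 vote_count[team] = [0] * n
--             vote_count[team][i] += 1
--     # stable multi-pass (radix) ranking: alphabetical base order, then one
--     # stable sort per position from last to first, descending by votes
--     order = sorted(vote_count)
--     for i in range(n - 1, -1, -1):
--         order = sorted(order, key=lambda t: -vote_count[t][i])
--     return ''.join(order)
-- ===== Notes on version B (the rewrite author's own statement) =====
-- stated objective: alternative
-- what changed: Replaces the single reverse sort keyed by the tuple (count-list, -ord(team)) with a stable multi-pass radix ranking: start from the alphabetically sorted team list and stably re-sort once per ballot position from last to first, descending by that position's vote count.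
import Mathlib
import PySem

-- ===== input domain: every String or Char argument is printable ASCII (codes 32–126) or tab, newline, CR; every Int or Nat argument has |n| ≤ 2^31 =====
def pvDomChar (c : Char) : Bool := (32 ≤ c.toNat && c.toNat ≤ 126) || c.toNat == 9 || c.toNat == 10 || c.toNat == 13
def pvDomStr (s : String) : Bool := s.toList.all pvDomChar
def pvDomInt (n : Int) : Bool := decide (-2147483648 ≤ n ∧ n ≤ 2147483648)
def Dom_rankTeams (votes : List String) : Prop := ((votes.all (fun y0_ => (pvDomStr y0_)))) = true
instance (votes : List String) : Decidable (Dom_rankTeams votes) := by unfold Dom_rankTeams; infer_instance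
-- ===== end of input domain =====

-- B replaces A's single reverse sort on the tuple key (count-list, -ord) by a stable
-- multi-pass radix ranking (alphabetical base order, then one stable sort per ballot
-- position from last to first, descending by that position's count); objective: alternative.

-- ===== PORT A =====
-- votes[0] is ported with headD (Python raises IndexError on []; excluded by Pre_).
-- vote_count[team][i] += 1 is ported with List.set / List.getD; exact since under Pre_
-- every index i is < n (Python raises IndexError for a vote longer than votes[0]).
def rankTeams (votes : List String) : String :=
  let n := (votes.headD "").toList.length
  let vote_count := votes.foldl (fun d vote =>
      (PySem.List.enumerate vote.toList).foldl (fun d p =>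
        d.insert p.2 ((d.getD p.2 (List.replicate n (0 : Int))).set p.1.toNat
          ((d.getD p.2 (List.replicate n (0 : Int))).getD p.1.toNat 0 + 1))) d)
    PySem.Dict.empty
  let teams := PySem.List.sorted vote_count.keys (fun t => t) false
  String.mk (PySem.List.sorted2 teams
    (fun t => vote_count.getD t (List.replicate n (0 : Int)))
    (fun t => -(t.toNat : Int)) true)

-- ===== PORT B =====
-- literal transliteration of Source B: same counting loop (plain dict, the membership test
-- and default insertion ported with Dict.setdefault), then the radix ranking:
-- alphabetical order, then for i in reversed(range(n)) a stable sort by -vote_count[t][i].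
def rankTeams_alt (votes : List String) : String :=
  let n := (votes.headD "").toList.length
  let vote_count := votes.foldl (fun d vote =>
      (PySem.List.enumerate vote.toList).foldl (fun d p =>
        ((d.setdefault p.2 (List.replicate n (0 : Int))).insert p.2
          (((d.setdefault p.2 (List.replicate n (0 : Int))).getD p.2 []).set p.1.toNat
            (((d.setdefault p.2 (List.replicate n (0 : Int))).getD p.2 []).getD p.1.toNat 0 + 1)))) d)
    PySem.Dict.empty
  let order := ((PySem.List.pyRange 0 (n : Int)).reverse).foldl
      (fun ord i => PySem.List.sorted ord (fun t => -((vote_count.getD t []).getD i.toNat 0)) false)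
      (PySem.List.sorted vote_count.keys (fun t => t) false)
  String.mk order

-- ===== PRECONDITION & SPEC =====
-- Pre_ excludes exactly the inputs where Python A raises: the empty list (votes[0] is an
-- IndexError) and inputs with a vote longer than votes[0] (vote_count[team][i] += 1 is an
-- IndexError there).  No input on which A returns is excluded.
def Pre_rankTeams (votes : List String) : Prop :=
  votes ≠ [] ∧ ∀ v ∈ votes, v.toList.length ≤ (votes.headD "").toList.length
instance (votes : List String) : Decidable (Pre_rankTeams votes) := by
  unfold Pre_rankTeams; infer_instance
def pvWitness_rankTeams : List String := ["ABC", "ACB"]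

def Spec_rankTeams (votes : List String) (out : String) : Prop := out = rankTeams_alt votes
instance (votes : List String) (out : String) : Decidable (Spec_rankTeams votes out) := by unfold Spec_rankTeams; infer_instance

-- ===== CLAIM (what is proved, stated in full; the proofs are below) =====
def Claim_equal_rankTeams : Prop := ∀ (votes : List String), Dom_rankTeams votes → Pre_rankTeams votes → Spec_rankTeams votes (rankTeams votes)

-- ===== LEMMAS AND PROOFS =====
def QRel {α : Type} (before : α → α → Bool) (S : α → α → Prop) (a b : α) : Prop :=
  before a b = true ∨ (before a b = false ∧ before b a = false ∧ S a b)
theorem insertBy_cons {α : Type} (before : α → α → Bool) (x y : α) (ys : List α) :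
    PySem.List.insertBy before x (y :: ys) =
      if before x y then x :: y :: ys else y :: PySem.List.insertBy before x ys := rfl
theorem insertBy_pairwise_q {α : Type} (before : α → α → Bool) (S : α → α → Prop)
    (htrans : ∀ a b c, before a b = true → before b c = true → before a c = true)
    (hneg : ∀ a b c, before a c = true → before a b = true ∨ before b c = true)
    (x : α) : ∀ (acc : List α), acc.Pairwise (QRel before S) → (∀ a ∈ acc, S a x) →
    (PySem.List.insertBy before x acc).Pairwise (QRel before S) := by
  intro acc
  induction acc with
  | nil => intro _ _; simp [PySem.List.insertBy]
  | cons y t ih =>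
    intro hp hS
    rw [insertBy_cons]
    rcases List.pairwise_cons.mp hp with ⟨hyt, hpt⟩
    by_cases hxy : before x y = true
    · simp only [hxy, if_true]
      refine List.pairwise_cons.mpr ⟨?_, hp⟩
      intro z hz
      rcases List.mem_cons.mp hz with hz | hz
      · subst hz; exact Or.inl hxy
      · rcases hyt z hz with hq | ⟨hq1, hq2, _⟩
        · exact Or.inl (htrans x y z hxy hq)
        · rcases hneg x z y hxy with h | h
          · exact Or.inl h
          · rw [hq2] at h; exact absurd h (by simp)
    · have hxy' : before x y = false := by simpa using hxy
      simp only [hxy]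
      refine List.pairwise_cons.mpr ⟨?_, ih hpt (fun a ha => hS a (List.mem_cons_of_mem _ ha))⟩
      intro z hz
      rcases (PySem.List.mem_insertBy before x z t).mp hz with hz | hz
      · rw [hz]
        by_cases hyx : before y x = true
        · exact Or.inl hyx
        · exact Or.inr ⟨by simpa using hyx, hxy', hS y (List.mem_cons_self)⟩
      · exact hyt z hz
theorem foldl_insertBy_pairwise_q {α : Type} (before : α → α → Bool) (S : α → α → Prop)
    (htrans : ∀ a b c, before a b = true → before b c = true → before a c = true)
    (hneg : ∀ a b c, before a c = true → before a b = true ∨ before b c = true) :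
    ∀ (xs acc : List α), acc.Pairwise (QRel before S) →
    (∀ a ∈ acc, ∀ x ∈ xs, S a x) → xs.Pairwise S →
    (xs.foldl (fun acc x => PySem.List.insertBy before x acc) acc).Pairwise (QRel before S) := by
  intro xs
  induction xs with
  | nil => intro acc h _ _; exact h
  | cons x rest ih =>
    intro acc hacc hSx hxs
    rcases List.pairwise_cons.mp hxs with ⟨hxr, hrest⟩
    simp only [List.foldl_cons]
    apply ih
    · exact insertBy_pairwise_q before S htrans hneg x acc hacc
        (fun a ha => hSx a ha x (List.mem_cons_self))
    · intro a ha y hy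
      rcases (PySem.List.mem_insertBy before x a acc).mp ha with h | h
      · subst h; exact hxr y hy
      · exact hSx a h y (List.mem_cons_of_mem _ hy)
    · exact hrest
def cntD (d : PySem.Dict Char (List Int)) (n : Nat) (t : Char) : List Int :=
  d.getD t (List.replicate n 0)
def keyBD (d : PySem.Dict Char (List Int)) (i : Int) (t : Char) : Int :=
  -((d.getD t []).getD i.toNat 0)
def RfinD (d : PySem.Dict Char (List Int)) (n : Nat) (a b : Char) : Prop :=
  cntD d n b < cntD d n a ∨ (cntD d n a = cntD d n b ∧ a < b)
def beforeA (d : PySem.Dict Char (List Int)) (n : Nat) (a b : Char) : Bool :=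
  decide (cntD d n b < cntD d n a) ||
    (!decide (cntD d n a < cntD d n b) && decide (-(b.toNat : Int) < -(a.toNat : Int)))

theorem beforeA_iff (d : PySem.Dict Char (List Int)) (n : Nat) (a b : Char) :
    beforeA d n a b = true ↔
      (cntD d n b < cntD d n a ∨ (¬ cntD d n a < cntD d n b ∧ -(b.toNat : Int) < -(a.toNat : Int))) := by
  simp [beforeA]

theorem beforeA_trans (d : PySem.Dict Char (List Int)) (n : Nat) :
    ∀ a b c, beforeA d n a b = true → beforeA d n b c = true → beforeA d n a c = true := by
  intro a b c hab hbc
  rw [beforeA_iff] at hab hbc ⊢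
  rcases hab with h1 | ⟨h1a, h1b⟩ <;> rcases hbc with h2 | ⟨h2a, h2b⟩
  · exact Or.inl (lt_trans h2 h1)
  · exact Or.inl (lt_of_le_of_lt (not_lt.mp h2a) h1)
  · exact Or.inl (lt_of_lt_of_le h2 (not_lt.mp h1a))
  · exact Or.inr ⟨not_lt.mpr (le_trans (not_lt.mp h2a) (not_lt.mp h1a)), lt_trans h2b h1b⟩

theorem beforeA_neg (d : PySem.Dict Char (List Int)) (n : Nat) :
    ∀ a b c, beforeA d n a c = true → beforeA d n a b = true ∨ beforeA d n b c = true := by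
  intro a b c hac
  rw [beforeA_iff] at hac
  rw [beforeA_iff, beforeA_iff]
  rcases hac with h | ⟨h1, h2⟩
  · rcases lt_or_ge (cntD d n b) (cntD d n a) with hb | hb
    · exact Or.inl (Or.inl hb)
    · exact Or.inr (Or.inl (lt_of_lt_of_le h hb))
  · rcases lt_or_ge (cntD d n b) (cntD d n a) with hb | hb
    · exact Or.inl (Or.inl hb)
    · rcases lt_or_ge (cntD d n c) (cntD d n b) with hc | hc
      · exact Or.inr (Or.inl hc)
      · rcases lt_or_ge (-(b.toNat : Int)) (-(a.toNat : Int)) with hk | hk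
        · exact Or.inl (Or.inr ⟨not_lt.mpr (le_trans hc (not_lt.mp h1)), hk⟩)
        · exact Or.inr (Or.inr ⟨not_lt.mpr (le_trans (not_lt.mp h1) hb), lt_of_lt_of_le h2 hk⟩)

theorem charNeg_lt (a b : Char) : (-(b.toNat : Int) < -(a.toNat : Int)) ↔ a < b := by
  rw [neg_lt_neg_iff, Char.lt_def, UInt32.lt_iff_toNat_lt]
  constructor
  · intro h; exact_mod_cast h
  · intro h; exact_mod_cast h

theorem sorted2_eq_foldl (xs : List Char) (k1 : Char → List Int) (k2 : Char → Int) :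
    PySem.List.sorted2 xs k1 k2 true =
      xs.foldl (fun acc x => PySem.List.insertBy
        (fun a b => decide (k1 b < k1 a) || (!decide (k1 a < k1 b) && decide (k2 b < k2 a)))
        x acc) [] := rfl

theorem sideA_pairwise (d : PySem.Dict Char (List Int)) (n : Nat) (T : List Char)
    (hT : T.Pairwise (· < ·)) :
    (PySem.List.sorted2 T (fun t => d.getD t (List.replicate n 0))
      (fun t => -(t.toNat : Int)) true).Pairwise (RfinD d n) := by
  rw [sorted2_eq_foldl]
  have h := foldl_insertBy_pairwise_q (beforeA d n) (fun a b : Char => a < b)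
    (beforeA_trans d n) (beforeA_neg d n) T [] List.Pairwise.nil (by simp) hT
  apply List.Pairwise.imp ?_ h
  intro a b hq
  rcases hq with hq | ⟨hq1, hq2, hS⟩
  · rw [beforeA_iff] at hq
    rcases hq with h | ⟨h1, h2⟩
    · exact Or.inl h
    · rcases lt_trichotomy (cntD d n a) (cntD d n b) with hlt | heq | hgt
      · exact absurd hlt h1
      · exact Or.inr ⟨heq, (charNeg_lt a b).mp h2⟩
      · exact Or.inl hgt
  · have h1 : ¬ (cntD d n b < cntD d n a ∨ (¬ cntD d n a < cntD d n b ∧ -(b.toNat : Int) < -(a.toNat : Int))) := by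
      rw [← beforeA_iff]; simp [hq1]
    have h2 : ¬ (cntD d n a < cntD d n b ∨ (¬ cntD d n b < cntD d n a ∧ -(a.toNat : Int) < -(b.toNat : Int))) := by
      rw [← beforeA_iff]; simp [hq2]
    exact Or.inr ⟨le_antisymm (not_lt.mp (not_or.mp h1).1) (not_lt.mp (not_or.mp h2).1), hS⟩

def RadRel (d : PySem.Dict Char (List Int)) : List Int → Char → Char → Prop
  | [], a, b => a < b
  | i :: is, a, b => keyBD d i a < keyBD d i b ∨ (keyBD d i a = keyBD d i b ∧ RadRel d is a b)

theorem sideB_pass (d : PySem.Dict Char (List Int)) (i : Int) (is : List Int)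
    (ord : List Char) (h : ord.Pairwise (RadRel d is)) :
    (PySem.List.sorted ord (keyBD d i) false).Pairwise (RadRel d (i :: is)) := by
  rw [PySem.List.sorted_eq_foldl_insertBy]
  have hq := foldl_insertBy_pairwise_q (fun a b => decide (keyBD d i a < keyBD d i b))
    (RadRel d is)
    (by intro a b c hab hbc; simp only [decide_eq_true_eq] at *; exact lt_trans hab hbc)
    (by intro a b c hac; simp only [decide_eq_true_eq] at *
        rcases lt_or_ge (keyBD d i a) (keyBD d i b) with h' | h'
        · exact Or.inl h'
        · exact Or.inr (lt_of_le_of_lt h' hac))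
    ord [] List.Pairwise.nil (by simp) h
  apply List.Pairwise.imp ?_ hq
  intro a b hab
  rcases hab with hab | ⟨h1, h2, hS⟩
  · simp only [decide_eq_true_eq] at hab
    exact Or.inl hab
  · simp only [decide_eq_false_iff_not, decide_eq_true_eq] at h1 h2
    exact Or.inr ⟨le_antisymm (not_lt.mp h2) (not_lt.mp h1), hS⟩

theorem sideB_fold (d : PySem.Dict Char (List Int)) :
    ∀ (cols : List Int) (rs : List Int) (ord : List Char), ord.Pairwise (RadRel d rs) →
    (cols.foldl (fun ord i => PySem.List.sorted ord (keyBD d i) false) ord).Pairwise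
      (RadRel d (cols.reverse ++ rs)) := by
  intro cols
  induction cols with
  | nil => intro rs ord h; simpa using h
  | cons c rest ih =>
    intro rs ord h
    simp only [List.foldl_cons, List.reverse_cons, List.append_assoc, List.singleton_append]
    exact ih (c :: rs) _ (sideB_pass d c rs ord h)

def idxFrom : Nat → Nat → List Int
  | _, 0 => []
  | k, m + 1 => (k : Int) :: idxFrom (k + 1) m

theorem idxFrom_eq : ∀ (m k : Nat), List.map (fun j => (Nat.cast j : Int)) (List.range' k m) = idxFrom k m := by
  intro m
  induction m with
  | zero => intro k; simp [idxFrom]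
  | succ m ihm => intro k; simp [idxFrom, List.range'_succ, ihm]

theorem radrel_iff (d : PySem.Dict Char (List Int)) (n : Nat) (a b : Char)
    (ha : d.getD a [] = cntD d n a) (hb : d.getD b [] = cntD d n b)
    (hla : (cntD d n a).length = n) (hlb : (cntD d n b).length = n) :
    ∀ (m k : Nat), k + m = n →
    (RadRel d (idxFrom k m) a b ↔
      ((cntD d n b).drop k < (cntD d n a).drop k ∨
        ((cntD d n a).drop k = (cntD d n b).drop k ∧ a < b))) := by
  intro m
  induction m with
  | zero =>
    intro k hk
    have e1 : (cntD d n a).drop k = [] := List.drop_eq_nil_of_le (by rw [hla]; omega)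
    have e2 : (cntD d n b).drop k = [] := List.drop_eq_nil_of_le (by rw [hlb]; omega)
    simp [idxFrom, RadRel, e1, e2, lt_irrefl]
  | succ m ihm =>
    intro k hk
    have hka : k < (cntD d n a).length := by rw [hla]; omega
    have hkb : k < (cntD d n b).length := by rw [hlb]; omega
    have e1 : keyBD d (k : Int) a = -((cntD d n a)[k]) := by
      simp [keyBD, ha, List.getElem?_eq_getElem hka]
    have e2 : keyBD d (k : Int) b = -((cntD d n b)[k]) := by
      simp [keyBD, hb, List.getElem?_eq_getElem hkb]
    simp only [idxFrom, RadRel]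
    rw [e1, e2, ihm (k + 1) (by omega),
      ← List.getElem_cons_drop hka, ← List.getElem_cons_drop hkb,
      List.cons_lt_cons_iff, List.cons_eq_cons, neg_lt_neg_iff, neg_inj]
    constructor
    · rintro (h | ⟨hxy, (hd | ⟨hde, hab⟩)⟩)
      · exact Or.inl (Or.inl h)
      · exact Or.inl (Or.inr ⟨hxy.symm, hd⟩)
      · exact Or.inr ⟨⟨hxy, hde⟩, hab⟩
    · rintro ((h | ⟨hxy, hd⟩) | ⟨⟨hxy, hde⟩, hab⟩)
      · exact Or.inl h
      · exact Or.inr ⟨hxy.symm, Or.inl hd⟩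
      · exact Or.inr ⟨hxy, Or.inr ⟨hde, hab⟩⟩

theorem rfin_antisymm (d : PySem.Dict Char (List Int)) (n : Nat) (a b : Char)
    (h1 : RfinD d n a b) (h2 : RfinD d n b a) : a = b := by
  rcases h1 with h1 | ⟨h1e, h1l⟩ <;> rcases h2 with h2 | ⟨h2e, h2l⟩
  · exact absurd h2 (lt_asymm h1)
  · rw [h2e] at h1; exact absurd h1 (lt_irrefl _)
  · rw [h1e] at h2; exact absurd h2 (lt_irrefl _)
  · exact absurd h2l (lt_asymm h1l)

theorem foldl_sorted_perm (d : PySem.Dict Char (List Int)) :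
    ∀ (cols : List Int) (ord : List Char),
    (cols.foldl (fun ord i => PySem.List.sorted ord (keyBD d i) false) ord).Perm ord := by
  intro cols
  induction cols with
  | nil => intro ord; exact List.Perm.refl _
  | cons c rest ih =>
    intro ord
    simp only [List.foldl_cons]
    exact (ih _).trans (PySem.List.sorted_perm _ _ _)

theorem ranking_eq (d : PySem.Dict Char (List Int)) (n : Nat)
    (hnd : d.keys.Nodup)
    (hlen : ∀ t v, d.get? t = some v → v.length = n) :
    PySem.List.sorted2 (PySem.List.sorted d.keys (fun t => t) false)
        (fun t => d.getD t (List.replicate n 0)) (fun t => -(t.toNat : Int)) true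
      = ((PySem.List.pyRange 0 (n : Int)).reverse).foldl
          (fun ord i => PySem.List.sorted ord
            (fun t => -((d.getD t []).getD i.toNat 0)) false)
          (PySem.List.sorted d.keys (fun t => t) false) := by
  have hpy : PySem.List.pyRange 0 (n : Int) = idxFrom 0 n := by
    rw [PySem.List.pyRange_zero_natCast, List.range_eq_range', idxFrom_eq]
  have hTperm : (PySem.List.sorted d.keys (fun t : Char => t) false).Perm d.keys :=
    PySem.List.sorted_perm _ _ _
  have hTnodup : (PySem.List.sorted d.keys (fun t : Char => t) false).Nodup :=
    hTperm.nodup_iff.mpr hnd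
  have hTle : (PySem.List.sorted d.keys (fun t : Char => t) false).Pairwise
      (fun a b : Char => a ≤ b) := PySem.List.sorted_pairwise _ _
  have hTlt : (PySem.List.sorted d.keys (fun t : Char => t) false).Pairwise (· < ·) := by
    apply List.Pairwise.imp ?_ (hTle.and hTnodup)
    intro a b hab; exact lt_of_le_of_ne hab.1 hab.2
  have hmem : ∀ t ∈ d.keys, d.getD t [] = cntD d n t ∧ (cntD d n t).length = n := by
    intro t ht
    cases hv : d.get? t with
    | none => exact absurd ht ((PySem.Dict.get?_eq_none_iff_not_mem_keys d t).mp hv)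
    | some v =>
      refine ⟨?_, ?_⟩
      · rw [cntD, PySem.Dict.getD_of_get?_eq_some d _ hv, PySem.Dict.getD_of_get?_eq_some d _ hv]
      · rw [cntD, PySem.Dict.getD_of_get?_eq_some d _ hv]; exact hlen t v hv
  have hA : (PySem.List.sorted2 (PySem.List.sorted d.keys (fun t : Char => t) false)
      (fun t => d.getD t (List.replicate n 0))
      (fun t => -(t.toNat : Int)) true).Pairwise (RfinD d n) :=
    sideA_pairwise d n _ hTlt
  have hAperm := PySem.List.sorted2_perm (PySem.List.sorted d.keys (fun t : Char => t) false)
      (fun t => d.getD t (List.replicate n 0)) (fun t => -(t.toNat : Int)) true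
  have hB0 : (PySem.List.sorted d.keys (fun t : Char => t) false).Pairwise (RadRel d []) := by
    apply List.Pairwise.imp ?_ hTlt
    intro a b hab; simpa [RadRel] using hab
  have hBfold := sideB_fold d ((idxFrom 0 n).reverse) []
      (PySem.List.sorted d.keys (fun t : Char => t) false) hB0
  rw [List.append_nil, List.reverse_reverse] at hBfold
  have hBperm := foldl_sorted_perm d ((idxFrom 0 n).reverse)
      (PySem.List.sorted d.keys (fun t : Char => t) false)
  have hB : (((idxFrom 0 n).reverse).foldl
      (fun ord i => PySem.List.sorted ord (keyBD d i) false)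
      (PySem.List.sorted d.keys (fun t : Char => t) false)).Pairwise (RfinD d n) := by
    apply List.Pairwise.imp_of_mem ?_ hBfold
    intro a b hamem hbmem hab
    have haK : a ∈ d.keys := hTperm.mem_iff.mp (hBperm.mem_iff.mp hamem)
    have hbK : b ∈ d.keys := hTperm.mem_iff.mp (hBperm.mem_iff.mp hbmem)
    rcases hmem a haK with ⟨ha1, ha2⟩
    rcases hmem b hbK with ⟨hb1, hb2⟩
    have := (radrel_iff d n a b ha1 hb1 ha2 hb2 n 0 (by omega)).mp hab
    simpa [RfinD] using this
  rw [hpy]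
  exact List.eq_of_perm_of_sorted
    (fun a b _ _ h1 h2 => rfin_antisymm d n a b h1 h2) hA hB
    (hAperm.trans hBperm.symm)

theorem foldl_pres {β : Type} (f : PySem.Dict Char (List Int) → β → PySem.Dict Char (List Int))
    (P : PySem.Dict Char (List Int) → Prop) (h : ∀ d x, P d → P (f d x)) :
    ∀ (l : List β) (d : PySem.Dict Char (List Int)), P d → P (l.foldl f d) := by
  intro l
  induction l with
  | nil => intro d hd; exact hd
  | cons x t ih => intro d hd; exact ih _ (h d x hd)

theorem count_step_eq (n : Nat) (d : PySem.Dict Char (List Int)) (p : Int × Char) :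
    ((d.setdefault p.2 (List.replicate n 0)).insert p.2
      (((d.setdefault p.2 (List.replicate n 0)).getD p.2 []).set p.1.toNat
        (((d.setdefault p.2 (List.replicate n 0)).getD p.2 []).getD p.1.toNat 0 + 1)))
    = d.insert p.2 ((d.getD p.2 (List.replicate n 0)).set p.1.toNat
        ((d.getD p.2 (List.replicate n 0)).getD p.1.toNat 0 + 1)) := by
  by_cases hc : d.contains p.2 = true
  · rw [PySem.Dict.setdefault_of_contains d _ hc]
    have : d.getD p.2 [] = d.getD p.2 (List.replicate n 0) := by
      cases hv : d.get? p.2 with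
      | none =>
        rw [PySem.Dict.contains_eq_isSome_get?, hv] at hc; simp at hc
      | some v =>
        rw [PySem.Dict.getD_of_get?_eq_some d _ hv, PySem.Dict.getD_of_get?_eq_some d _ hv]
    rw [this]
  · have hc' : d.contains p.2 = false := by simpa using hc
    rw [PySem.Dict.setdefault_of_not_contains d _ hc']
    rw [PySem.Dict.getD_insert_self, PySem.Dict.insert_insert_self,
      PySem.Dict.getD_of_not_contains d _ hc']

theorem countA_eq_countB (n : Nat) (votes : List String) :
    (votes.foldl (fun d vote =>
      (PySem.List.enumerate vote.toList).foldl (fun d p =>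
        ((d.setdefault p.2 (List.replicate n 0)).insert p.2
          (((d.setdefault p.2 (List.replicate n 0)).getD p.2 []).set p.1.toNat
            (((d.setdefault p.2 (List.replicate n 0)).getD p.2 []).getD p.1.toNat 0 + 1)))) d)
      (PySem.Dict.empty : PySem.Dict Char (List Int)))
    = (votes.foldl (fun d vote =>
      (PySem.List.enumerate vote.toList).foldl (fun d p =>
        d.insert p.2 ((d.getD p.2 (List.replicate n 0)).set p.1.toNat
          ((d.getD p.2 (List.replicate n 0)).getD p.1.toNat 0 + 1))) d)
      (PySem.Dict.empty : PySem.Dict Char (List Int))) := by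
  simp only [count_step_eq]

theorem countD_nodup (n : Nat) (votes : List String) :
    (votes.foldl (fun d vote =>
      (PySem.List.enumerate vote.toList).foldl (fun d p =>
        d.insert p.2 ((d.getD p.2 (List.replicate n 0)).set p.1.toNat
          ((d.getD p.2 (List.replicate n 0)).getD p.1.toNat 0 + 1))) d)
      (PySem.Dict.empty : PySem.Dict Char (List Int))).keys.Nodup := by
  refine foldl_pres _ (fun d => d.keys.Nodup) ?_ votes _ PySem.Dict.nodup_keys_empty
  intro d vote hd
  exact PySem.Dict.nodup_keys_foldl_insert_key (PySem.List.enumerate vote.toList)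
    (fun p => p.2)
    (fun d p => ((d.getD p.2 (List.replicate n 0)).set p.1.toNat
      ((d.getD p.2 (List.replicate n 0)).getD p.1.toNat 0 + 1))) d hd

theorem countD_len (n : Nat) (votes : List String) :
    ∀ t v, (votes.foldl (fun d vote =>
      (PySem.List.enumerate vote.toList).foldl (fun d p =>
        d.insert p.2 ((d.getD p.2 (List.replicate n 0)).set p.1.toNat
          ((d.getD p.2 (List.replicate n 0)).getD p.1.toNat 0 + 1))) d)
      (PySem.Dict.empty : PySem.Dict Char (List Int))).get? t = some v → v.length = n := by
  refine foldl_pres _ (fun d => ∀ t v, d.get? t = some v → v.length = n) ?_ votes _ ?_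
  · intro d vote hd
    refine foldl_pres _ (fun d => ∀ t v, d.get? t = some v → v.length = n) ?_ _ _ hd
    intro d p hdp t v hv
    rw [PySem.Dict.get?_insert] at hv
    split_ifs at hv with ht
    · cases hv
      rw [List.length_set]
      cases hg : d.get? p.2 with
      | none => rw [PySem.Dict.getD_eq_get?_getD, hg]; simp
      | some w => rw [PySem.Dict.getD_of_get?_eq_some d _ hg]; exact hdp _ _ hg
    · exact hdp t v hv
  · intro t v hv
    rw [PySem.Dict.get?_empty] at hv
    cases hv

-- ===== VERDICT (by name: the statement is the Claim_ definition above) =====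
theorem rankTeams_spec : Claim_equal_rankTeams := by
  intro votes _ _
  show rankTeams votes = rankTeams_alt votes
  show String.mk (PySem.List.sorted2
      (PySem.List.sorted (votes.foldl (fun d vote =>
        (PySem.List.enumerate vote.toList).foldl (fun d p =>
          d.insert p.2 ((d.getD p.2 (List.replicate (votes.headD "").toList.length (0 : Int))).set p.1.toNat
            ((d.getD p.2 (List.replicate (votes.headD "").toList.length (0 : Int))).getD p.1.toNat 0 + 1))) d)
        (PySem.Dict.empty : PySem.Dict Char (List Int))).keys (fun t => t) false)
      (fun t => (votes.foldl (fun d vote =>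
        (PySem.List.enumerate vote.toList).foldl (fun d p =>
          d.insert p.2 ((d.getD p.2 (List.replicate (votes.headD "").toList.length (0 : Int))).set p.1.toNat
            ((d.getD p.2 (List.replicate (votes.headD "").toList.length (0 : Int))).getD p.1.toNat 0 + 1))) d)
        (PySem.Dict.empty : PySem.Dict Char (List Int))).getD t
          (List.replicate (votes.headD "").toList.length (0 : Int)))
      (fun t => -(t.toNat : Int)) true)
    = String.mk (((PySem.List.pyRange 0 ((votes.headD "").toList.length : Int)).reverse).foldl
      (fun ord i => PySem.List.sorted ord (fun t =>
        -(((votes.foldl (fun d vote =>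
          (PySem.List.enumerate vote.toList).foldl (fun d p =>
            ((d.setdefault p.2 (List.replicate (votes.headD "").toList.length (0 : Int))).insert p.2
              (((d.setdefault p.2 (List.replicate (votes.headD "").toList.length (0 : Int))).getD p.2 []).set p.1.toNat
                (((d.setdefault p.2 (List.replicate (votes.headD "").toList.length (0 : Int))).getD p.2 []).getD p.1.toNat 0 + 1)))) d)
          (PySem.Dict.empty : PySem.Dict Char (List Int))).getD t []).getD i.toNat 0)) false)
      (PySem.List.sorted (votes.foldl (fun d vote =>
        (PySem.List.enumerate vote.toList).foldl (fun d p =>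
          ((d.setdefault p.2 (List.replicate (votes.headD "").toList.length (0 : Int))).insert p.2
            (((d.setdefault p.2 (List.replicate (votes.headD "").toList.length (0 : Int))).getD p.2 []).set p.1.toNat
              (((d.setdefault p.2 (List.replicate (votes.headD "").toList.length (0 : Int))).getD p.2 []).getD p.1.toNat 0 + 1)))) d)
        (PySem.Dict.empty : PySem.Dict Char (List Int))).keys (fun t => t) false))
  rw [countA_eq_countB]
  exact congrArg String.mk (ranking_eq _ _
    (countD_nodup (votes.headD "").toList.length votes)
    (countD_len (votes.headD "").toList.length votes))
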